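-- pv_equiv track=rewrite | github.com/jaaaana/vi_proekt | agent.py | foo
-- ===== SOURCE A (Python) =====
-- def foo(grid):
--     rechnik1 = {}
--     rechnik2 = {}
--     for i in (0, 2, 4):
--         for j in range(5):
--             if i // 2 not in rechnik1:
--                 rechnik1[i // 2] = {}
--                 rechnik2[i // 2] = {}
--             if grid[i][j] not in rechnik1[i // 2]:
--                 rechnik1[i // 2][grid[i][j]] = 0
--                 rechnik2[i // 2][grid[i][j]] = 0
--             rechnik1[i // 2][grid[i][j]] += 1
--
--     for j in (0, 2, 4):
--         for i in range(5):
--             if j // 2 + 3 not in rechnik1: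
--                 rechnik1[j // 2 + 3] = {}
--                 rechnik2[j // 2 + 3] = {}
--             if grid[i][j] not in rechnik1[j // 2 + 3]:
--                 rechnik1[j // 2 + 3][grid[i][j]] = 0
--                 rechnik2[j // 2 + 3][grid[i][j]] = 0
--             rechnik1[j // 2 + 3][grid[i][j]] += 1
--
--     return rechnik1, rechnik2
-- ===== SOURCE B (Python) =====
-- def foo(grid):
--     groups = [(i // 2, [grid[i][j] for j in range(5)]) for i in (0, 2, 4)] + \
--              [(j // 2 + 3, [grid[i][j] for i in range(5)]) for j in (0, 2, 4)]
--     rechnik1 = {k: {v: vals.count(v) for v in dict.fromkeys(vals)}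
--                 for k, vals in groups}
--     rechnik2 = {k: {v: 0 for v in d} for k, d in rechnik1.items()}
--     return rechnik1, rechnik2
-- ===== Notes on version B (the rewrite author's own statement) =====
-- stated objective: alternative
-- what changed: A counts by incrementing nested dict entries in one lockstep double loop with lazy creation; B never increments anything: it extracts the six row/column value lists, deduplicates each in first-occurrence order (dict.fromkeys) and computes every frequency with a vals.count(v) scan, then derives the zeroed rechnik2 from rechnik1 in a separate pass.
import Mathlib
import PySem

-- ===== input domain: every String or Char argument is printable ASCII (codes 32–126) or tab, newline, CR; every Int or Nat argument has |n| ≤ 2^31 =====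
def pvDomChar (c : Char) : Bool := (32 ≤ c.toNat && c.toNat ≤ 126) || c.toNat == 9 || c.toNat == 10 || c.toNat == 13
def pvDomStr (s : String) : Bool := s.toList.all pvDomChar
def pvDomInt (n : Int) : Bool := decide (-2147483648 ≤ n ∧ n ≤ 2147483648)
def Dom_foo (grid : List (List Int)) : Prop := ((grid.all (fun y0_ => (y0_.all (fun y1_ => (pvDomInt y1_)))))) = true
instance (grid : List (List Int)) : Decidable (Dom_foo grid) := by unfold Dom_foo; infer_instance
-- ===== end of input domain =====

-- B replaces A's incremental lockstep dict-counting loop by an ordered-dedup of each of the six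
-- row/column value groups plus a count-scan per distinct value, then a separate zeroing pass
-- (objective: a genuinely different counting algorithm of the same cost).

-- ===== PORT A =====
-- grid[i][j], total wrapper: Pre_foo keeps all accessed indices in range, so the defaults are never used
def pvVal (grid : List (List Int)) (i j : Int) : Int :=
  PySem.List.pyGetD (PySem.List.pyGetD grid i []) j 0

-- one iteration of A's inner loop body for outer key k and value v = grid[i][j]
def pvStepA (k : Int) (st : PySem.Dict Int (PySem.Dict Int Int) × PySem.Dict Int (PySem.Dict Int Int))
    (v : Int) : PySem.Dict Int (PySem.Dict Int Int) × PySem.Dict Int (PySem.Dict Int Int) :=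
  let st := if st.1.contains k then st else (st.1.insert k .empty, st.2.insert k .empty)
  let st := if (st.1.getD k .empty).contains v then st
            else (st.1.insert k ((st.1.getD k .empty).insert v 0),
                  st.2.insert k ((st.2.getD k .empty).insert v 0))
  (st.1.insert k ((st.1.getD k .empty).insert v ((st.1.getD k .empty).getD v 0 + 1)), st.2)

def foo (grid : List (List Int)) : (List (Int × List (Int × Int))) × (List (Int × List (Int × Int))) :=
  let st := ([0, 2, 4] : List Int).foldl (fun st i =>
      (PySem.List.pyRange 0 5 1).foldl (fun st j =>
        pvStepA (PySem.Int.floordiv i 2) st (pvVal grid i j)) st)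
    (.empty, .empty)
  let st := ([0, 2, 4] : List Int).foldl (fun st j =>
      (PySem.List.pyRange 0 5 1).foldl (fun st i =>
        pvStepA (PySem.Int.floordiv j 2 + 3) st (pvVal grid i j)) st)
    st
  (st.1.items.map (fun p => (p.1, p.2.items)), st.2.items.map (fun p => (p.1, p.2.items)))

-- ===== PORT B =====
def foo_alt (grid : List (List Int)) : (List (Int × List (Int × Int))) × (List (Int × List (Int × Int))) :=
  let groups :=
    ([0, 2, 4] : List Int).map (fun i =>
      (PySem.Int.floordiv i 2, (PySem.List.pyRange 0 5 1).map (fun j => pvVal grid i j)))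
    ++ ([0, 2, 4] : List Int).map (fun j =>
      (PySem.Int.floordiv j 2 + 3, (PySem.List.pyRange 0 5 1).map (fun i => pvVal grid i j)))
  -- {v: vals.count(v) for v in dict.fromkeys(vals)}
  let rechnik1 := groups.map (fun p =>
    (p.1, (PySem.List.dedup p.2).map (fun v => (v, (PySem.List.count p.2 v : Int)))))
  let rechnik2 := rechnik1.map (fun p => (p.1, p.2.map (fun q => (q.1, (0 : Int)))))
  (rechnik1, rechnik2)

-- ===== PRECONDITION & SPEC =====
-- Pre_foo: exactly the grids on which A returns (A reads grid[i][j] for all i, j < 5; anything else raises IndexError)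
def Pre_foo (grid : List (List Int)) : Prop :=
  5 ≤ grid.length ∧ ∀ row ∈ grid.take 5, 5 ≤ row.length
instance (grid : List (List Int)) : Decidable (Pre_foo grid) := by unfold Pre_foo; infer_instance
def pvWitness_foo : List (List Int) :=
  [[1, 2, 1, 2, 1], [0, 0, 0, 0, 0], [3, 3, 3, 3, 3], [1, 1, 2, 2, 3], [5, 4, 3, 2, 1]]
def Spec_foo (grid : List (List Int)) (out : (List (Int × List (Int × Int))) × (List (Int × List (Int × Int)))) : Prop := out = foo_alt grid
instance (grid : List (List Int)) (out : (List (Int × List (Int × Int))) × (List (Int × List (Int × Int)))) : Decidable (Spec_foo grid out) := by unfold Spec_foo; infer_instance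

-- ===== CLAIM (what is proved, stated in full; the proofs are below) =====
def Claim_equal_foo : Prop := ∀ (grid : List (List Int)), Dom_foo grid → Pre_foo grid → Spec_foo grid (foo grid)

-- ===== LEMMAS AND PROOFS =====

def pvZeros (vs : List Int) : PySem.Dict Int Int :=
  PySem.Dict.mk ((PySem.Set.ofList vs).map (fun v => (v, (0 : Int))))

theorem pvRange5 : PySem.List.pyRange 0 5 1 = [0, 1, 2, 3, 4] := by decide

theorem pvModifyEq (d : PySem.Dict Int Int) (k : Int) (d0 : Int) (f : Int → Int) :
    d.modify k d0 f = d.insert k (f (d.getD k d0)) := PySem.Dict.ext_iff.mpr rfl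

theorem pvStepA_insert (k v : Int) (pre : List Int)
    (r1 r2 : PySem.Dict Int (PySem.Dict Int Int)) :
    pvStepA k (r1.insert k (PySem.Dict.counter pre), r2.insert k (pvZeros pre)) v
      = (r1.insert k (PySem.Dict.counter (pre ++ [v])), r2.insert k (pvZeros (pre ++ [v]))) := by
  by_cases hv : v ∈ pre
  · have hz : pvZeros (pre ++ [v]) = pvZeros pre := by
      unfold pvZeros
      rw [PySem.Set.ofList_append_singleton, PySem.Set.add_of_mem ((PySem.Set.mem_ofList pre v).mpr hv)]
    simp [pvStepA, PySem.Dict.contains_insert_self, PySem.Dict.getD_insert_self,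
      PySem.Dict.contains_counter, hv, hz, PySem.Dict.insert_insert_self,
      PySem.Dict.counter_append_singleton, pvModifyEq]
  · have hzc : (pvZeros pre).contains v = false := by
      unfold pvZeros
      rw [PySem.Dict.contains_mk]
      simp only [List.any_map, List.any_eq_false]
      intro x hx
      simp only [Function.comp]
      have : x ≠ v := fun h => hv (h ▸ (PySem.Set.mem_ofList pre x).mp hx)
      simpa using this
    have hz : (pvZeros pre).insert v 0 = pvZeros (pre ++ [v]) := by
      apply PySem.Dict.ext_iff.mpr
      rw [PySem.Dict.items_insert_of_not_contains _ _ hzc]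
      unfold pvZeros
      rw [PySem.Set.ofList_append_singleton, PySem.Set.add_of_not_mem (fun h => hv ((PySem.Set.mem_ofList pre v).mp h))]
      simp
    have hcount : (PySem.Dict.counter pre).getD v 0 = 0 := by
      rw [PySem.Dict.getD_counter]
      simp [List.count_eq_zero_of_not_mem hv]
    simp [pvStepA, PySem.Dict.contains_insert_self, PySem.Dict.getD_insert_self,
      PySem.Dict.contains_counter, hv, hz, PySem.Dict.insert_insert_self,
      PySem.Dict.counter_append_singleton, pvModifyEq, hcount]

theorem pvBlockMain (vs : List Int) (pre : List Int) (k : Int)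
    (r1 r2 : PySem.Dict Int (PySem.Dict Int Int)) :
    vs.foldl (pvStepA k) (r1.insert k (PySem.Dict.counter pre), r2.insert k (pvZeros pre))
      = (r1.insert k (PySem.Dict.counter (pre ++ vs)), r2.insert k (pvZeros (pre ++ vs))) := by
  induction vs generalizing pre with
  | nil => simp
  | cons v rest ih =>
      rw [List.foldl_cons, pvStepA_insert, ih (pre ++ [v])]
      simp

theorem pvBlockA (k v : Int) (vs : List Int)
    (r1 r2 : PySem.Dict Int (PySem.Dict Int Int)) (h1 : r1.contains k = false) :
    (v :: vs).foldl (pvStepA k) (r1, r2)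
      = (r1.insert k (PySem.Dict.counter (v :: vs)), r2.insert k (pvZeros (v :: vs))) := by
  rw [List.foldl_cons]
  have h0 : pvStepA k (r1, r2) v = pvStepA k (r1.insert k .empty, r2.insert k .empty) v := by
    simp [pvStepA, h1]
  rw [h0]
  have h := pvBlockMain (v :: vs) [] k r1 r2
  rw [List.foldl_cons] at h
  simpa using h

def pvVals (g : Int → Int) : List Int := [g 0, g 1, g 2, g 3, g 4]

theorem pvChain (g0 g1 g2 g3 g4 g5 : Int → Int) :
    List.foldl (fun st j => pvStepA 5 st (g5 j))
      (List.foldl (fun st j => pvStepA 4 st (g4 j))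
        (List.foldl (fun st j => pvStepA 3 st (g3 j))
          (List.foldl (fun st j => pvStepA 2 st (g2 j))
            (List.foldl (fun st j => pvStepA 1 st (g1 j))
              (List.foldl (fun st j => pvStepA 0 st (g0 j))
                (PySem.Dict.empty, PySem.Dict.empty) ([0,1,2,3,4] : List Int))
              ([0,1,2,3,4] : List Int)) ([0,1,2,3,4] : List Int)) ([0,1,2,3,4] : List Int))
        ([0,1,2,3,4] : List Int)) ([0,1,2,3,4] : List Int)
    = ((((((PySem.Dict.empty.insert 0 (PySem.Dict.counter (pvVals g0))).insert 1
            (PySem.Dict.counter (pvVals g1))).insert 2 (PySem.Dict.counter (pvVals g2))).insert 3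
            (PySem.Dict.counter (pvVals g3))).insert 4 (PySem.Dict.counter (pvVals g4))).insert 5
            (PySem.Dict.counter (pvVals g5)),
       (((((PySem.Dict.empty.insert 0 (pvZeros (pvVals g0))).insert 1
            (pvZeros (pvVals g1))).insert 2 (pvZeros (pvVals g2))).insert 3
            (pvZeros (pvVals g3))).insert 4 (pvZeros (pvVals g4))).insert 5
            (pvZeros (pvVals g5))) := by
  have blk : ∀ (k : Int) (g : Int → Int) (r1 r2 : PySem.Dict Int (PySem.Dict Int Int)),
      r1.contains k = false →
      List.foldl (fun st j => pvStepA k st (g j)) (r1, r2) ([0,1,2,3,4] : List Int)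
        = (r1.insert k (PySem.Dict.counter (pvVals g)), r2.insert k (pvZeros (pvVals g))) := by
    intro k g r1 r2 h
    exact pvBlockA k (g 0) [g 1, g 2, g 3, g 4] r1 r2 h
  rw [blk 0 g0 _ _ (by simp [PySem.Dict.contains_empty])]
  rw [blk 1 g1 _ _ (by simp [PySem.Dict.contains_insert, PySem.Dict.contains_empty])]
  rw [blk 2 g2 _ _ (by simp [PySem.Dict.contains_insert, PySem.Dict.contains_empty])]
  rw [blk 3 g3 _ _ (by simp [PySem.Dict.contains_insert, PySem.Dict.contains_empty])]
  rw [blk 4 g4 _ _ (by simp [PySem.Dict.contains_insert, PySem.Dict.contains_empty])]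
  rw [blk 5 g5 _ _ (by simp [PySem.Dict.contains_insert, PySem.Dict.contains_empty])]


-- ===== VERDICT (by name: the statement is the Claim_ definition above) =====
theorem foo_spec : Claim_equal_foo := by
  intro grid _ _
  unfold Spec_foo foo foo_alt
  rw [pvRange5]
  simp only [List.foldl_cons, List.foldl_nil, List.map_cons, List.map_nil,
    List.cons_append, List.nil_append]
  have k0 : PySem.Int.floordiv (0 : Int) 2 = 0 := by decide
  have k1 : PySem.Int.floordiv (2 : Int) 2 = 1 := by decide
  have k2 : PySem.Int.floordiv (4 : Int) 2 = 2 := by decide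
  simp only [k0, k1, k2, show ((0:Int)+3) = 3 from by norm_num,
    show ((1:Int)+3) = 4 from by norm_num, show ((2:Int)+3) = 5 from by norm_num]
  have h := pvChain (fun j => pvVal grid 0 j) (fun j => pvVal grid 2 j) (fun j => pvVal grid 4 j)
      (fun i => pvVal grid i 0) (fun i => pvVal grid i 2) (fun i => pvVal grid i 4)
  simp only [List.foldl_cons, List.foldl_nil] at h
  rw [h]
  simp [PySem.Dict.items_insert, PySem.Dict.contains_insert, pvVals, pvZeros,
    PySem.Dict.items_counter, PySem.List.count_eq, List.map_map, Function.comp_def,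
    PySem.Dict.empty]
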